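-- pv_equiv track=rewrite | github.com/WAcry/groq-whisper | backend/src/groq_whisper_service/stable_prefix.py | _strip_edge_punctuation
-- ===== SOURCE A (Python) =====
-- import string
-- import unicodedata
--
-- def _is_edge_punctuation(char: str) -> bool:
--     if char in string.whitespace:
--         return True
--     return unicodedata.category(char).startswith("P")
--
-- def _strip_edge_punctuation(text: str) -> str:
--     start = 0
--     end = len(text)
--     while start < end and _is_edge_punctuation(text[start]):
--         start += 1
--     while end > start and _is_edge_punctuation(text[end - 1]):
--         end -= 1
--     return text[start:end]
-- ===== SOURCE B (Python) =====
-- import string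
-- import unicodedata
--
--
-- def _is_edge_punctuation(char: str) -> bool:
--     if char in string.whitespace:
--         return True
--     return unicodedata.category(char).startswith("P")
--
--
-- def _strip_edge_punctuation(text: str) -> str:
--     out = []
--     pending = []
--     for c in text:
--         if _is_edge_punctuation(c):
--             if out:
--                 pending.append(c)
--         else:
--             out.extend(pending)
--             pending = []
--             out.append(c)
--     return "".join(out)
-- ===== Notes on version B (the rewrite author's own statement) =====
-- stated objective: alternative
-- what changed: B replaces A's two shrinking index pointers plus final slice by a single left-to-right pass that builds the output directly, buffering interior edge characters in a pending list that is flushed on the next non-edge character and discarded at the end.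
import Mathlib
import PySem

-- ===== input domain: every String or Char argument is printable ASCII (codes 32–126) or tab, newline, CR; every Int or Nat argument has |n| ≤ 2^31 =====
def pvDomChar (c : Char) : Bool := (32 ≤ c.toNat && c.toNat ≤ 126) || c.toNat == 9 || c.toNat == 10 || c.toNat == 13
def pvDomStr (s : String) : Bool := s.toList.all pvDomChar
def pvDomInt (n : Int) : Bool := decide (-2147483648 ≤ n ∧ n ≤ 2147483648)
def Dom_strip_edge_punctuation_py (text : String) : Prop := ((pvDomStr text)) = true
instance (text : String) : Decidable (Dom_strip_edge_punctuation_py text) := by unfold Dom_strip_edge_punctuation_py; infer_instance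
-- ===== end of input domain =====

-- B re-implements A's two-pointer strip as a single forward pass with a pending buffer
-- (alternative decomposition, same cost); the return values are proved equal on Dom.

-- ===== PORT A =====
-- _is_edge_punctuation: whitespace or Unicode category P; ported by hand as the explicit
-- character set, exact on the ASCII/tab/newline/CR domain the claim is about.
def pvIsEdge (c : Char) : Bool :=
  [' ', '\t', '\n', '\x0b', '\x0c', '\r', '!', '"', '#', '%', '&', '\'', '(', ')', '*',
   ',', '-', '.', '/', ':', ';', '?', '@', '[', '\\', ']', '_', '{', '}'].contains c

-- first while loop: advance start while start < end and text[start] is edge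
def pvFindStart (l : List Char) (e : Nat) (s : Nat) : Nat :=
  if _h : s < e then
    if pvIsEdge (l.getD s ' ') then pvFindStart l e (s + 1) else s
  else s
termination_by e - s

-- second while loop: retreat end while end > start and text[end-1] is edge
def pvFindEnd (l : List Char) (s : Nat) (e : Nat) : Nat :=
  if _h : e > s then
    if pvIsEdge (l.getD (e - 1) ' ') then pvFindEnd l s (e - 1) else e
  else e
termination_by e

-- returns text[start:end] with 0 ≤ start ≤ end ≤ len (guaranteed by the loops)
def strip_edge_punctuation_py (text : String) : String :=
  String.mk ((text.toList.drop (pvFindStart text.toList text.toList.length 0)).take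
    (pvFindEnd text.toList (pvFindStart text.toList text.toList.length 0) text.toList.length
      - pvFindStart text.toList text.toList.length 0))

-- ===== PORT B =====
-- one pass: out accumulates the stripped text, pending buffers edge chars seen after
-- the first kept char; pending is flushed on a non-edge char, discarded at the end.
def pvStepB (acc : List Char × List Char) (c : Char) : List Char × List Char :=
  if pvIsEdge c then
    if acc.1.isEmpty then acc else (acc.1, acc.2 ++ [c])
  else
    (acc.1 ++ acc.2 ++ [c], [])

def strip_edge_punctuation_py_alt (text : String) : String :=
  String.mk ((text.toList.foldl pvStepB ([], [])).1)

-- ===== PRECONDITION & SPEC =====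
def Spec_strip_edge_punctuation_py (text : String) (out : String) : Prop := out = strip_edge_punctuation_py_alt text
instance (text : String) (out : String) : Decidable (Spec_strip_edge_punctuation_py text out) := by unfold Spec_strip_edge_punctuation_py; infer_instance

-- ===== CLAIM (what is proved, stated in full; the proofs are below) =====
def Claim_equal_strip_edge_punctuation_py : Prop := ∀ (text : String), Dom_strip_edge_punctuation_py text → Spec_strip_edge_punctuation_py text (strip_edge_punctuation_py text)

-- ===== LEMMAS AND PROOFS =====

-- canonical form both programs compute: drop the leading edge run, then the trailing one
def pvTrimR (xs : List Char) : List Char := (xs.reverse.dropWhile pvIsEdge).reverse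
def pvCanon (xs : List Char) : List Char := pvTrimR (xs.dropWhile pvIsEdge)

theorem dropWhile_append_cons_not (c : Char) (hc : pvIsEdge c = false) :
    ∀ (xs ys : List Char),
      List.dropWhile pvIsEdge (xs ++ c :: ys) = List.dropWhile pvIsEdge xs ++ c :: ys := by
  intro xs ys
  induction xs with
  | nil => simp [List.dropWhile, hc]
  | cons a xs ih =>
      by_cases ha : pvIsEdge a
      · simp [List.dropWhile, ha, ih]
      · simp [List.dropWhile, ha]

theorem trimR_cons (c : Char) (hc : pvIsEdge c = false) (m : List Char) :
    pvTrimR (c :: m) = c :: pvTrimR m := by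
  simp [pvTrimR, dropWhile_append_cons_not c hc]

theorem trimR_append_cons (pend : List Char) (c : Char) (hc : pvIsEdge c = false)
    (m : List Char) : pvTrimR (pend ++ c :: m) = pend ++ c :: pvTrimR m := by
  have : (pend ++ c :: m).reverse = m.reverse ++ c :: pend.reverse := by simp
  simp [pvTrimR, this, dropWhile_append_cons_not c hc]

theorem trimR_all_edge (xs : List Char) (h : ∀ c ∈ xs, pvIsEdge c = true) :
    pvTrimR xs = [] := by
  have : xs.reverse.dropWhile pvIsEdge = [] := by
    rw [List.dropWhile_eq_nil_iff]
    intro x hx; exact h x (List.mem_reverse.mp hx)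
  simp [pvTrimR, this]

theorem trimR_snoc_edge (xs : List Char) (c : Char) (hc : pvIsEdge c = true) :
    pvTrimR (xs ++ [c]) = pvTrimR xs := by
  simp [pvTrimR, hc]

theorem trimR_snoc_not (xs : List Char) (c : Char) (hc : pvIsEdge c = false) :
    pvTrimR (xs ++ [c]) = xs ++ [c] := by
  simp [pvTrimR, hc]

-- ---- B side ----
theorem foldB_inv (m : List Char) :
    ∀ (out pend : List Char), out ≠ [] → (∀ c ∈ pend, pvIsEdge c = true) →
      (List.foldl pvStepB (out, pend) m).1 = out ++ pvTrimR (pend ++ m) := by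
  induction m with
  | nil =>
      intro out pend _ hp
      simp [trimR_all_edge pend hp]
  | cons c m ih =>
      intro out pend hout hp
      by_cases hc : pvIsEdge c
      · have hout' : out.isEmpty = false := by
          cases out with
          | nil => exact absurd rfl hout
          | cons a l => simp [List.isEmpty]
        have hstep : pvStepB (out, pend) c = (out, pend ++ [c]) := by
          simp [pvStepB, hc, hout']
        have hp' : ∀ x ∈ pend ++ [c], pvIsEdge x = true := by
          intro x hx
          rcases List.mem_append.mp hx with h | h
          · exact hp x h
          · simp at h; subst h; exact hc
        have h2 := ih out (pend ++ [c]) hout hp'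
        rw [List.foldl_cons, hstep, h2]
        simp
      · have hc' : pvIsEdge c = false := by simpa using hc
        have hstep : pvStepB (out, pend) c = (out ++ pend ++ [c], []) := by
          simp [pvStepB, hc']
        have h2 := ih (out ++ pend ++ [c]) [] (by simp) (by intro x hx; simp at hx)
        rw [List.foldl_cons, hstep, h2, trimR_append_cons pend c hc' m]
        simp

theorem foldB_canon (m : List Char) :
    (List.foldl pvStepB ([], []) m).1 = pvCanon m := by
  induction m with
  | nil => simp [pvCanon, pvTrimR]
  | cons c m ih =>
      by_cases hc : pvIsEdge c
      · have : pvStepB ([], []) c = ([], []) := by simp [pvStepB, hc]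
        simp only [List.foldl, this, ih, pvCanon, List.dropWhile, hc]
      · have hc' : pvIsEdge c = false := by simpa using hc
        have : pvStepB ([], []) c = ([c], []) := by simp [pvStepB, hc']
        have h2 := foldB_inv m [c] [] (by simp) (by intro x hx; simp at hx)
        simp only [List.foldl, this, h2]
        simp [pvCanon, List.dropWhile, hc', trimR_cons c hc']

-- ---- A side ----
theorem getD_append_cons (pre : List Char) (c : Char) (r : List Char) :
    (pre ++ c :: r).getD pre.length ' ' = c := by
  induction pre with
  | nil => simp
  | cons a pre ih => simpa using ih

theorem findStart_spec (r : List Char) :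
    ∀ (pre : List Char),
      pvFindStart (pre ++ r) (pre.length + r.length) pre.length
        = pre.length + (r.takeWhile pvIsEdge).length := by
  induction r with
  | nil =>
      intro pre
      rw [pvFindStart]
      simp
  | cons c r ih =>
      intro pre
      rw [pvFindStart]
      have hlt : pre.length < pre.length + (c :: r).length := by simp
      rw [dif_pos hlt, getD_append_cons]
      by_cases hc : pvIsEdge c
      · rw [if_pos hc]
        have := ih (pre ++ [c])
        have h1 : (pre ++ [c]) ++ r = pre ++ c :: r := by simp
        have h2 : (pre ++ [c]).length = pre.length + 1 := by simp
        rw [h1, h2] at this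
        have h3 : pre.length + 1 + r.length = pre.length + (c :: r).length := by
          simp; omega
        rw [h3] at this
        rw [this]
        simp [List.takeWhile, hc]; omega
      · have hc' : pvIsEdge c = false := by simpa using hc
        rw [if_neg hc]
        simp [List.takeWhile, hc']

theorem findEnd_spec (r : List Char) :
    ∀ (pre junk : List Char),
      pvFindEnd (pre ++ r ++ junk) pre.length (pre.length + r.length)
        = pre.length + (pvTrimR r).length := by
  induction r using List.reverseRecOn with
  | nil =>
      intro pre junk
      rw [pvFindEnd]
      simp [pvTrimR]
  | append_singleton r c ih =>
      intro pre junk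
      rw [pvFindEnd]
      have hlt : pre.length < pre.length + (r ++ [c]).length := by simp
      rw [dif_pos hlt]
      have hidx : pre.length + (r ++ [c]).length - 1 = (pre ++ r).length := by
        simp
      have hlist : pre ++ (r ++ [c]) ++ junk = (pre ++ r) ++ c :: junk := by simp
      rw [hidx, hlist, getD_append_cons]
      by_cases hc : pvIsEdge c
      · rw [if_pos hc]
        have hpr : (pre ++ r).length = pre.length + r.length := by simp
        have h2 := ih pre ([c] ++ junk)
        have hl2 : pre ++ r ++ ([c] ++ junk) = (pre ++ r) ++ c :: junk := by simp
        rw [hl2] at h2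
        rw [hpr, trimR_snoc_edge r c hc]
        exact h2
      · have hc' : pvIsEdge c = false := by simpa using hc
        rw [if_neg hc, trimR_snoc_not r c hc']

theorem takeWhile_dropWhile_nil (l : List Char) :
    ((l.dropWhile pvIsEdge).takeWhile pvIsEdge) = [] := by
  induction l with
  | nil => simp
  | cons c l ih =>
      by_cases hc : pvIsEdge c
      · simpa [List.dropWhile, hc] using ih
      · simp [List.dropWhile, hc]

theorem take_trimR (r : List Char) : r.take (pvTrimR r).length = pvTrimR r := by
  have hsplit : r = pvTrimR r ++ (r.reverse.takeWhile pvIsEdge).reverse := by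
    have h1 := List.takeWhile_append_dropWhile (p := pvIsEdge) (l := r.reverse)
    calc r = r.reverse.reverse := by simp
    _ = (r.reverse.takeWhile pvIsEdge ++ r.reverse.dropWhile pvIsEdge).reverse := by rw [h1]
    _ = pvTrimR r ++ (r.reverse.takeWhile pvIsEdge).reverse := by
          rw [List.reverse_append]
          rfl
  nth_rewrite 2 [hsplit]
  exact List.take_left

theorem stripA_canon (l : List Char) :
    ((l.drop (pvFindStart l l.length 0)).take
      (pvFindEnd l (pvFindStart l l.length 0) l.length - pvFindStart l l.length 0))
      = pvCanon l := by
  have hl : l = l.takeWhile pvIsEdge ++ l.dropWhile pvIsEdge :=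
    (List.takeWhile_append_dropWhile).symm
  have hlen : l.length = (l.takeWhile pvIsEdge).length + (l.dropWhile pvIsEdge).length := by
    have h := congrArg List.length hl
    rwa [List.length_append] at h
  have hs : pvFindStart l l.length 0 = (l.takeWhile pvIsEdge).length := by
    simpa [takeWhile_dropWhile_nil] using findStart_spec l []
  have he : pvFindEnd l (l.takeWhile pvIsEdge).length l.length
      = (l.takeWhile pvIsEdge).length + (pvTrimR (l.dropWhile pvIsEdge)).length := by
    have h := findEnd_spec (l.dropWhile pvIsEdge) (l.takeWhile pvIsEdge) []
    rw [List.append_nil, ← hl, ← hlen] at h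
    exact h
  have hdrop : l.drop (l.takeWhile pvIsEdge).length = l.dropWhile pvIsEdge := by
    nth_rewrite 2 [hl]
    exact List.drop_left
  rw [hs, he, hdrop, Nat.add_sub_cancel_left, take_trimR]
  rfl

-- ===== VERDICT (by name: the statement is the Claim_ definition above) =====
theorem strip_edge_punctuation_py_spec : Claim_equal_strip_edge_punctuation_py := by
  intro text _
  unfold Spec_strip_edge_punctuation_py strip_edge_punctuation_py strip_edge_punctuation_py_alt
  rw [foldB_canon, stripA_canon]
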